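-- pv_equiv track=rewrite | github.com/WilliamEkberg/Legend | backend/mcp_server.py | _render_decisions_md
-- ===== SOURCE A (Python) =====
-- def _render_decisions_md(decisions: list[dict], heading_prefix: str) -> str:
--     """Group decisions by category and render as markdown."""
--     if not decisions:
--         return ""
--     grouped: dict[str, list[dict]] = {}
--     for d in decisions:
--         cat = d.get("category") or "General"
--         grouped.setdefault(cat, []).append(d)
--
--     lines: list[str] = []
--     for category, items in grouped.items():
--         lines.append(f"{heading_prefix} {category}")
--         for d in items:
--             lines.append(f"- {d['text']} *(source: {d.get('source', 'unknown')})*")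
--             detail = d.get("detail")
--             if detail:
--                 for detail_line in detail.split("\n"):
--                     lines.append(f"  > {detail_line}")
--             lines.append("")
--         lines.append("")
--     return "\n".join(lines)
-- ===== SOURCE B (Python) =====
-- def _render_decisions_md(decisions: list[dict], heading_prefix: str) -> str:
--     """Group decisions by category and render as markdown."""
--     if not decisions:
--         return ""
--     # stage 1: pre-render each decision's block once, tagged with its category
--     rendered = []
--     for d in decisions:
--         block = [f"- {d['text']} *(source: {d.get('source', 'unknown')})*"]
--         detail = d.get("detail")
--         if detail:
--             block.extend("  > " + dl for dl in detail.split("\n"))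
--         block.append("")
--         rendered.append((d.get("category") or "General", block))
--     # stage 2: assemble sections per distinct category (first-occurrence order)
--     seen_cats = list(dict.fromkeys(cat for cat, _ in rendered))
--     lines = [ln
--              for cat in seen_cats
--              for ln in [f"{heading_prefix} {cat}"]
--                        + [bl for c, b in rendered if c == cat for bl in b]
--                        + [""]]
--     return "\n".join(lines)
-- ===== Notes on version B (the rewrite author's own statement) =====
-- stated objective: alternative
-- what changed: A builds a dict of per-category decision lists and renders inside a nested loop with append-accumulators; B is staged: it first pre-renders every decision into a (category, block-of-lines) pair in one pass, then assembles the output by comprehensions/flatMap over the distinct categories, filtering the pre-rendered blocks — no grouping dict and no mutable line accumulator.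
import Mathlib
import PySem

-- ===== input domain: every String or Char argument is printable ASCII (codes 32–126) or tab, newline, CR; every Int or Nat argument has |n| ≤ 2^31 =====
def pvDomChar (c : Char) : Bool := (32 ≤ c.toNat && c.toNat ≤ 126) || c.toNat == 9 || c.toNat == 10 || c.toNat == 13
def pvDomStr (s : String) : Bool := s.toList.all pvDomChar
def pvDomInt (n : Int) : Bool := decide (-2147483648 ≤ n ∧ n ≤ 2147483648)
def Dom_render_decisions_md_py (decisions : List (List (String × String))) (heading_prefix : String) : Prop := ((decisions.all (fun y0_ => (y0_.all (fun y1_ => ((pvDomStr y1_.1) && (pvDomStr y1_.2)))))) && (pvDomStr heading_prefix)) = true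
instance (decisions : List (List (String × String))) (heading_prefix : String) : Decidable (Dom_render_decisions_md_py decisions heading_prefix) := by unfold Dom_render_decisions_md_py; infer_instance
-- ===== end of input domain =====

-- B replaces A's grouping dict + nested append-loops by a staged pipeline: pre-render every
-- decision into a (category, block) pair, then assemble the sections by flatMap/filter
-- over the distinct categories (objective: alternative).

-- shared key expression: `d.get("category") or "General"` ("" is falsy)
def pvCat (d : List (String × String)) : String :=
  match (PySem.Dict.mk d).get? "category" with
  | some s => if s = "" then "General" else s
  | none => "General"

-- ===== PORT A =====
-- d["text"] is totalized with "": Pre_ excludes decisions without a "text" key, where Python raises.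
def render_decisions_md_py (decisions : List (List (String × String))) (heading_prefix : String) : String :=
  if decisions = [] then ""
  else
    let grouped : PySem.Dict String (List (List (String × String))) :=
      decisions.foldl (fun g d => g.modify (pvCat d) [] (· ++ [d])) PySem.Dict.empty
    let lines : List String :=
      grouped.items.foldl
        (fun ls p =>
          let ls := ls ++ [heading_prefix ++ " " ++ p.1]
          let ls := p.2.foldl
            (fun l2 d =>
              let l2 := l2 ++ ["- " ++ ((PySem.Dict.mk d).getD "text" "") ++ " *(source: "
                                  ++ ((PySem.Dict.mk d).getD "source" "unknown") ++ ")*"]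
              let l2 := match (PySem.Dict.mk d).get? "detail" with
                | some det => if det = "" then l2
                              else l2 ++ ((PySem.Str.split? det "\n").getD []).map (fun dl => "  > " ++ dl)
                | none => l2
              l2 ++ [""]) ls
          ls ++ [""]) []
    PySem.Str.join "\n" lines

-- ===== PORT B =====
-- the pre-rendered block of one decision (d["text"] totalized with "", see Pre_)
def pvBlock (d : List (String × String)) : List String :=
  ["- " ++ ((PySem.Dict.mk d).getD "text" "") ++ " *(source: "
      ++ ((PySem.Dict.mk d).getD "source" "unknown") ++ ")*"]
  ++ (match (PySem.Dict.mk d).get? "detail" with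
      | some det => if det = "" then []
                    else ((PySem.Str.split? det "\n").getD []).map (fun dl => "  > " ++ dl)
      | none => [])
  ++ [""]

def render_decisions_md_py_alt (decisions : List (List (String × String))) (heading_prefix : String) : String :=
  if decisions = [] then ""
  else
    let rendered : List (String × List String) := decisions.map (fun d => (pvCat d, pvBlock d))
    let seenCats : List String := PySem.List.dedup (rendered.map Prod.fst)
    let lines : List String :=
      seenCats.flatMap (fun cat =>
        (heading_prefix ++ " " ++ cat)
          :: (((rendered.filter (fun p => p.1 == cat)).flatMap Prod.snd) ++ [""]))
    PySem.Str.join "\n" lines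

-- ===== PRECONDITION & SPEC =====
-- Pre_ excludes exactly the decisions without a "text" key, where Python's d["text"] raises KeyError.
def Pre_render_decisions_md_py (decisions : List (List (String × String))) (heading_prefix : String) : Prop :=
  decisions.all (fun d => ((PySem.Dict.mk d).get? "text").isSome) = true
instance (decisions : List (List (String × String))) (heading_prefix : String) : Decidable (Pre_render_decisions_md_py decisions heading_prefix) := by unfold Pre_render_decisions_md_py; infer_instance

def pvWitness_render_decisions_md_py : (List (List (String × String))) × String :=
  ([[("text", "ship it"), ("category", "A")], [("text", "hold"), ("detail", "why\nnot")]], "##")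

def Spec_render_decisions_md_py (decisions : List (List (String × String))) (heading_prefix : String) (out : String) : Prop := out = render_decisions_md_py_alt decisions heading_prefix
instance (decisions : List (List (String × String))) (heading_prefix : String) (out : String) : Decidable (Spec_render_decisions_md_py decisions heading_prefix out) := by unfold Spec_render_decisions_md_py; infer_instance

-- ===== CLAIM (what is proved, stated in full; the proofs are below) =====
def Claim_equal_render_decisions_md_py : Prop := ∀ (decisions : List (List (String × String))) (heading_prefix : String), Dom_render_decisions_md_py decisions heading_prefix → Pre_render_decisions_md_py decisions heading_prefix → Spec_render_decisions_md_py decisions heading_prefix (render_decisions_md_py decisions heading_prefix)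

-- ===== LEMMAS AND PROOFS =====

-- A's inner per-decision step just appends the pre-rendered block.
theorem step_eq_block (l2 : List String) (d : List (String × String)) :
    (let l2 := l2 ++ ["- " ++ ((PySem.Dict.mk d).getD "text" "") ++ " *(source: "
                        ++ ((PySem.Dict.mk d).getD "source" "unknown") ++ ")*"]
     let l2 := match (PySem.Dict.mk d).get? "detail" with
       | some det => if det = "" then l2
                     else l2 ++ ((PySem.Str.split? det "\n").getD []).map (fun dl => "  > " ++ dl)
       | none => l2
     l2 ++ [""]) = l2 ++ pvBlock d := by
  unfold pvBlock
  cases h : (PySem.Dict.mk d).get? "detail" with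
  | none => simp
  | some det => by_cases hdet : det = "" <;> simp [hdet]

-- A's grouping dict, characterised: its items are the distinct categories in first-occurrence
-- order, each paired with the sublist of decisions of that category.
theorem items_grouped (ds : List (List (String × String))) :
    (ds.foldl (fun g d => g.modify (pvCat d) [] (· ++ [d])) PySem.Dict.empty).items
      = (PySem.Set.ofList (ds.map pvCat)).map
          (fun c => (c, ds.filter (fun d => pvCat d == c))) := by
  have hfold : ds.foldl (fun g d => g.modify (pvCat d) [] (· ++ [d])) PySem.Dict.empty
      = (ds.map (fun d => (pvCat d, d))).foldl
          (fun g p => g.modify p.1 [] (· ++ [p.2])) PySem.Dict.empty := by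
    rw [List.foldl_map]
  have hkeys : (ds.foldl (fun g d => g.modify (pvCat d) [] (· ++ [d])) PySem.Dict.empty).keys
      = PySem.Set.ofList (ds.map pvCat) := by
    rw [PySem.Dict.keys_foldl_modify_key ds pvCat [] (fun _ d => (· ++ [d]))]
    simp [PySem.Set.update, PySem.Set.ofList, PySem.Dict.keys_empty, List.foldl_map]
  have hnd : (ds.foldl (fun g d => g.modify (pvCat d) [] (· ++ [d])) PySem.Dict.empty).keys.Nodup :=
    PySem.Dict.nodup_keys_foldl_modify_key ds pvCat [] (fun _ d => (· ++ [d])) _ (by simp)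
  rw [PySem.Dict.items_eq_map_keys _ hnd [], hkeys]
  refine List.map_congr_left (fun c _ => ?_)
  rw [hfold, PySem.Dict.getD_foldl_modify_append]
  simp [List.filter_map, Function.comp_def]

-- ===== VERDICT =====
theorem render_decisions_md_py_spec : Claim_equal_render_decisions_md_py := by
  intro ds hp _ _
  unfold Spec_render_decisions_md_py render_decisions_md_py render_decisions_md_py_alt
  by_cases h : ds = []
  · simp [h]
  · simp only [if_neg h]
    congr 1
    rw [items_grouped]
    simp only [step_eq_block]
    have hstep : (fun (ls : List String) (p : String × List (List (String × String))) =>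
          (p.2.foldl (fun l2 d => l2 ++ pvBlock d) (ls ++ [hp ++ " " ++ p.1])) ++ [""])
        = (fun ls p => ls ++ ((hp ++ " " ++ p.1) :: (p.2.flatMap pvBlock ++ [""]))) := by
      funext ls p
      rw [PySem.List.foldl_append_eq_flatMap]
      simp
    rw [hstep, List.foldl_map, PySem.List.foldl_append_eq_flatMap]
    simp [PySem.List.dedup_eq_ofList, List.filter_map, List.flatMap_map, Function.comp_def,
      List.map_map]
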